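-- pv_equiv track=rewrite | github.com/sunliang98/abacus-develop | interfaces/ASE_interface/abacuslite/utils/ksampling.py | merge_ksgm
-- ===== SOURCE A (Python) =====
-- from typing import Optional, Tuple, List, Dict
--
-- def merge_ksgm(segments) -> Tuple[List[str], List[bool]]:
--     '''
--     SeeKpath generates the path of kpoints in the format of list of 2-element tuples.
--     This is good but not quite compatible with some DFT softwares like ABACUS. This
--     function will return a list of special kpoint labels accompanied with a boolean
--     list that helps distinguish the breakpoint of path.
--
--     Parameters
--     ----------
--     segments : List[Tuple[str, str]]
--         The list of kpath segments. Each segment is a tuple of two strings,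
--         where the first string is the starting point of the segment and the
--         second string is the ending point of the segment, like [(Gamma, M),
--         (M, K), (K, Gamma)]
--
--     Returns
--     -------
--     Tuple[List[str], List[bool]]
--         The first element is the list of special kpoint labels. The second element
--         is the boolean list that helps distinguish the breakpoint of path.
--     '''
--     klabels, is_brkpt = [segments[0][0]], [False]
--     for i, (start, end) in enumerate(segments):
--         if start != klabels[-1]:
--             is_brkpt[-1] = True
--             klabels.append(start)
--             is_brkpt.append(False)
--
--         klabels.append(end)
--         is_brkpt.append(i == len(segments) - 1)
--
--     return klabels, is_brkpt
-- ===== SOURCE B (Python) =====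
-- def merge_ksgm(segments):
--     # Stateless re-derivation: each segment's neighbourhood determines its
--     # contribution, so precompute previous-end and next-start lists and emit
--     # labels/flags by two comprehensions over the zipped segments.
--     s0 = segments[0][0]
--     prevs = [s0] + [e for _, e in segments[:-1]]
--     nexts = [s for s, _ in segments[1:]] + [None]
--     klabels = [s0] + [lab
--                       for (s, e), p in zip(segments, prevs)
--                       for lab in ([s, e] if s != p else [e])]
--     is_brkpt = [False] + [b
--                           for (s, e), p, nx in zip(segments, prevs, nexts)
--                           for b in ([False] if s != p else []) + [nx is None or nx != e]]
--     return klabels, is_brkpt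
-- ===== Notes on version B (the rewrite author's own statement) =====
-- stated objective: alternative
-- what changed: A walks the segments once with mutable state, appending to klabels and back-patching is_brkpt[-1] when a discontinuity is met; B is stateless: it precomputes previous-end and next-start neighbour lists and produces klabels and is_brkpt by two independent comprehensions over the zipped segments, deciding each breakpoint by lookahead instead of back-patching.
import Mathlib
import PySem

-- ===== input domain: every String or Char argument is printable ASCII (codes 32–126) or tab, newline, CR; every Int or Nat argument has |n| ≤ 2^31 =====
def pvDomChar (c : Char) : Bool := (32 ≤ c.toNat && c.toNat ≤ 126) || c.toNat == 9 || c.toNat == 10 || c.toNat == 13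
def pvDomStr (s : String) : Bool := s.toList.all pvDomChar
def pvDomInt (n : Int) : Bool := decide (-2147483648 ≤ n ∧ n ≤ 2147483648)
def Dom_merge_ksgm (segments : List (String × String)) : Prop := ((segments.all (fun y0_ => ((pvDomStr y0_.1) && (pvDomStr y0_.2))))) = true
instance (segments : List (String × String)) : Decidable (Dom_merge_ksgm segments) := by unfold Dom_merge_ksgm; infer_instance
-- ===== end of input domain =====

-- B replaces A's stateful back-patching walk by a stateless pair of comprehensions over
-- precomputed neighbour lists (objective: alternative decomposition, same O(n) cost).

-- ===== PORT A =====
-- loop body of A's 'for i, (start, end) in enumerate(segments)':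
-- klabels[-1] read via pyGetD (klabels is never empty), is_brkpt[-1] = True via pySetD.
def mergeStepA (n : Int) (st : List String × List Bool) (p : Int × (String × String)) :
    List String × List Bool :=
  let st' :=
    if p.2.1 ≠ PySem.List.pyGetD st.1 (-1) "" then
      (st.1 ++ [p.2.1], PySem.List.pySetD st.2 (-1) true ++ [false])
    else st
  (st'.1 ++ [p.2.2], st'.2 ++ [decide (p.1 = n - 1)])

def merge_ksgm (segments : List (String × String)) : List String × List Bool :=
  match segments with
  | [] => ([], [])  -- Python raises IndexError on segments[0][0]; excluded by Pre_
  | (s0, _) :: _ =>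
    (PySem.List.enumerate segments 0).foldl (mergeStepA (PySem.List.len segments)) ([s0], [false])

-- ===== PORT B =====
def merge_ksgm_alt (segments : List (String × String)) : List String × List Bool :=
  match segments with
  | [] => ([], [])  -- Python raises IndexError on segments[0][0]; excluded by Pre_
  | (s0, _) :: _ =>
    let prevs : List String :=
      s0 :: (PySem.List.slice segments none (some (-1))).map (fun x => x.2)       -- segments[:-1]
    let nexts : List (Option String) :=
      (PySem.List.slice segments (some 1) none).map (fun x => some x.1) ++ [none] -- segments[1:]
    let klabels := s0 :: (segments.zip prevs).flatMap
      (fun x => if x.1.1 ≠ x.2 then [x.1.1, x.1.2] else [x.1.2])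
    let is_brkpt := false :: (segments.zip (prevs.zip nexts)).flatMap
      (fun x => (if x.1.1 ≠ x.2.1 then [false] else []) ++
        [decide (x.2.2 = none) || decide (x.2.2 ≠ some x.1.2)])   -- 'nx is None or nx != e'
    (klabels, is_brkpt)

-- ===== PRECONDITION & SPEC =====
-- Pre_ excludes only the empty list, on which Python A raises IndexError.
def Pre_merge_ksgm (segments : List (String × String)) : Prop := segments ≠ []
instance (segments : List (String × String)) : Decidable (Pre_merge_ksgm segments) := by
  unfold Pre_merge_ksgm; infer_instance
def pvWitness_merge_ksgm : (List (String × String)) := [("G", "M"), ("M", "K"), ("X", "G")]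

def Spec_merge_ksgm (segments : List (String × String)) (out : List String × List Bool) : Prop := out = merge_ksgm_alt segments
instance (segments : List (String × String)) (out : List String × List Bool) : Decidable (Spec_merge_ksgm segments out) := by unfold Spec_merge_ksgm; infer_instance

-- ===== CLAIM (what is proved, stated in full; the proofs are below) =====
def Claim_equal_merge_ksgm : Prop := ∀ (segments : List (String × String)), Dom_merge_ksgm segments → Pre_merge_ksgm segments → Spec_merge_ksgm segments (merge_ksgm segments)

-- ===== LEMMAS AND PROOFS =====

-- the breakpoint flag segment i's end finally carries, read off from the tail
def brkAux (e : String) (tail : List (String × String)) : Bool :=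
  match tail with | [] => true | (s', _) :: _ => decide (s' ≠ e)

-- common specification: the contribution of the remaining segments given the previous label
def specRec (prev : String) (rest : List (String × String)) : List String × List Bool :=
  match rest with
  | [] => ([], [])
  | (s, e) :: tail =>
    let r := specRec e tail
    if s ≠ prev then (s :: e :: r.1, false :: brkAux e tail :: r.2)
    else (e :: r.1, brkAux e tail :: r.2)

-- whether A's back-patch fires when the loop resumes with last label 'prev'
def patchB (prev : String) (rest : List (String × String)) : Bool :=
  match rest with
  | [] => false
  | (s, _) :: _ => decide (s ≠ prev)

lemma set_append_singleton {α : Type} (xs : List α) (x v : α) :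
    (xs ++ [x]).set xs.length v = xs ++ [v] := by
  induction xs with
  | nil => rfl
  | cons a t ih => simp [ih]

lemma pyIdx_last (n : Nat) : PySem.List.pyIdx? (n + 1) (-1) = some n := by
  unfold PySem.List.pyIdx?
  split_ifs <;> first | (simp; omega) | (exfalso; omega) | rfl

lemma pySetD_append_singleton_neg_one {α : Type} (xs : List α) (x v : α) :
    PySem.List.pySetD (xs ++ [x]) (-1) v = xs ++ [v] := by
  simp only [PySem.List.pySetD, PySem.List.pySet?, List.length_append, List.length_cons,
    List.length_nil, Nat.zero_add, pyIdx_last, Option.map_some, Option.getD_some,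
    set_append_singleton]

lemma brk_resolve (n i : Int) (e : String) (tail : List (String × String))
    (h : i + 1 + (tail.length : Int) = n) :
    (decide (i = n - 1) || patchB e tail) = brkAux e tail := by
  cases tail with
  | nil =>
    have hi : i = n - 1 := by simp only [List.length_nil, Nat.cast_zero] at h; omega
    simp [patchB, brkAux, hi]
  | cons t ts =>
    have hi : ¬ (i = n - 1) := by
      simp only [List.length_cons] at h; push_cast at h; omega
    obtain ⟨s', e'⟩ := t
    simp [patchB, brkAux, hi]

lemma lemA (n : Int) (rest : List (String × String)) :
    ∀ (i : Int) (ks : List String) (bs : List Bool) (prev : String) (b : Bool),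
      i + (rest.length : Int) = n →
      List.foldl (mergeStepA n) (ks ++ [prev], bs ++ [b]) (PySem.List.enumerate rest i)
      = (ks ++ prev :: (specRec prev rest).1,
         bs ++ (b || patchB prev rest) :: (specRec prev rest).2) := by
  induction rest with
  | nil =>
    intro i ks bs prev b h
    simp [PySem.List.enumerate_nil, specRec, patchB]
  | cons hd tail ih =>
    obtain ⟨s, e⟩ := hd
    intro i ks bs prev b h
    simp only [List.length_cons] at h
    rw [PySem.List.enumerate_cons]
    simp only [List.foldl_cons]
    have hlast : PySem.List.pyGetD (ks ++ [prev]) (-1) "" = prev :=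
      PySem.List.pyGetD_neg_one_append_singleton ks prev ""
    have hbrk := brk_resolve n i e tail (by push_cast at h ⊢; omega)
    by_cases hs : s = prev
    · have hstep : mergeStepA n (ks ++ [prev], bs ++ [b]) (i, (s, e))
          = ((ks ++ [prev]) ++ [e], (bs ++ [b]) ++ [decide (i = n - 1)]) := by
        simp [mergeStepA, hlast, hs]
      rw [hstep, ih (i + 1) (ks ++ [prev]) (bs ++ [b]) e (decide (i = n - 1))
            (by push_cast at h ⊢; omega)]
      simp only [specRec, patchB, hs]
      rw [← hbrk]
      simp [patchB]
    · have hstep : mergeStepA n (ks ++ [prev], bs ++ [b]) (i, (s, e))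
          = ((ks ++ [prev, s]) ++ [e], (bs ++ [true, false]) ++ [decide (i = n - 1)]) := by
        simp [mergeStepA, hlast, hs, pySetD_append_singleton_neg_one]
      rw [hstep, ih (i + 1) (ks ++ [prev, s]) (bs ++ [true, false]) e (decide (i = n - 1))
            (by push_cast at h ⊢; omega)]
      simp only [specRec, patchB, hs]
      rw [← hbrk]
      simp [patchB, hs]

lemma lemB_labels (rest : List (String × String)) :
    ∀ (prev : String),
      (rest.zip (prev :: rest.dropLast.map (fun x => x.2))).flatMap
        (fun x => if x.1.1 ≠ x.2 then [x.1.1, x.1.2] else [x.1.2])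
      = (specRec prev rest).1 := by
  induction rest with
  | nil => intro prev; simp [specRec]
  | cons hd tail ih =>
    obtain ⟨s, e⟩ := hd
    intro prev
    cases tail with
    | nil => by_cases hs : s = prev <;> simp [specRec, hs]
    | cons t ts =>
      obtain ⟨s', e'⟩ := t
      have hd' : ((s, e) :: (s', e') :: ts).dropLast = (s, e) :: ((s', e') :: ts).dropLast := rfl
      have ih' := ih e
      simp only [List.zip_cons_cons, List.flatMap_cons] at ih'
      rw [hd']
      simp only [List.map_cons, List.zip_cons_cons, List.flatMap_cons]
      rw [ih']
      by_cases hs : s = prev <;> simp [specRec, hs]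

lemma lemB_flags (rest : List (String × String)) :
    ∀ (prev : String),
      (rest.zip ((prev :: rest.dropLast.map (fun x => x.2)).zip
          (rest.tail.map (fun x => some x.1) ++ [none]))).flatMap
        (fun x => (if x.1.1 ≠ x.2.1 then [false] else []) ++
          [decide (x.2.2 = none) || decide (x.2.2 ≠ some x.1.2)])
      = (specRec prev rest).2 := by
  induction rest with
  | nil => intro prev; simp [specRec]
  | cons hd tail ih =>
    obtain ⟨s, e⟩ := hd
    intro prev
    cases tail with
    | nil => by_cases hs : s = prev <;> simp [specRec, brkAux, hs]
    | cons t ts =>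
      obtain ⟨s', e'⟩ := t
      have hd' : ((s, e) :: (s', e') :: ts).dropLast = (s, e) :: ((s', e') :: ts).dropLast := rfl
      have ih' := ih e
      simp only [List.tail_cons] at ih'
      rw [hd']
      simp only [List.map_cons, List.cons_append, List.zip_cons_cons, List.flatMap_cons, List.tail_cons]
      rw [ih']
      by_cases hs : s = prev <;> simp [specRec, brkAux, hs]

-- ===== VERDICT (by name: the statement is the Claim_ definition above) =====
theorem merge_ksgm_spec : Claim_equal_merge_ksgm := by
  intro segments _ hpre
  unfold Spec_merge_ksgm
  match segments, hpre with
  | (s0, e0) :: tl, _ =>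
    have hA := lemA (PySem.List.len ((s0, e0) :: tl)) ((s0, e0) :: tl) 0 [] [] s0 false
      (by simp [PySem.List.len_eq])
    simp only [List.nil_append] at hA
    have hL := lemB_labels ((s0, e0) :: tl) s0
    have hF := lemB_flags ((s0, e0) :: tl) s0
    simp only [merge_ksgm, merge_ksgm_alt, PySem.List.slice_to_neg_one, PySem.List.slice_from_one]
    rw [hA, hL, hF]
    simp [patchB]
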